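-- pv_equiv track=rewrite | github.com/timmills/tapcommand | backend/app/routers/templates.py | _generate_capability_command_cpp
-- ===== SOURCE A (Python) =====
-- def _escape_cpp_string(value: str) -> str:
--     return value.replace("\\", "\\\\").replace('"', '\\"')
--
-- def _generate_capability_command_cpp(port_capabilities) -> str:
--     """Generate C++ code to populate the commands array in capabilities JSON"""
--     if not port_capabilities:
--         return "          // No commands configured"
--
--     lines = []
--     all_commands = set()
--
--     # Collect all unique commands across all ports
--     for port_cap in port_capabilities:
--         all_commands.update(port_cap['commands'])
--
--     # Sort commands for consistent output
--     sorted_commands = sorted(all_commands)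
--
--     for command in sorted_commands:
--         # Escape command name for C++ string literal
--         escaped_command = _escape_cpp_string(command)
--         lines.append(f'          commands.add("{escaped_command}");')
--
--     return "\n".join(lines)
-- ===== SOURCE B (Python) =====
-- def _escape_cpp_string(value: str) -> str:
--     return value.replace("\\", "\\\\").replace('"', '\\"')
--
-- def _generate_capability_command_cpp(port_capabilities) -> str:
--     """Generate C++ code to populate the commands array in capabilities JSON"""
--     if not port_capabilities:
--         return "          // No commands configured"
--
--     # Online algorithm: no sort() call and no set. 'acc' is kept sorted and
--     # duplicate-free at every step; each command is inserted at its position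
--     # (or skipped if already present) as it is encountered.
--     acc = []
--     for port_cap in port_capabilities:
--         for command in port_cap['commands']:
--             i = 0
--             while i < len(acc) and acc[i] < command:
--                 i += 1
--             if i == len(acc) or acc[i] != command:
--                 acc.insert(i, command)
--
--     return "\n".join(
--         f'          commands.add("{_escape_cpp_string(c)}");' for c in acc
--     )
-- ===== Notes on version B (the rewrite author's own statement) =====
-- stated objective: alternative
-- what changed: Replaces A's collect-into-a-hash-set-then-sort pipeline with an online insertion algorithm: a sorted duplicate-free accumulator is maintained throughout one traversal, each command being inserted at its ordered position or skipped if already present, so no sort() and no set are used at all.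
import Mathlib
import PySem

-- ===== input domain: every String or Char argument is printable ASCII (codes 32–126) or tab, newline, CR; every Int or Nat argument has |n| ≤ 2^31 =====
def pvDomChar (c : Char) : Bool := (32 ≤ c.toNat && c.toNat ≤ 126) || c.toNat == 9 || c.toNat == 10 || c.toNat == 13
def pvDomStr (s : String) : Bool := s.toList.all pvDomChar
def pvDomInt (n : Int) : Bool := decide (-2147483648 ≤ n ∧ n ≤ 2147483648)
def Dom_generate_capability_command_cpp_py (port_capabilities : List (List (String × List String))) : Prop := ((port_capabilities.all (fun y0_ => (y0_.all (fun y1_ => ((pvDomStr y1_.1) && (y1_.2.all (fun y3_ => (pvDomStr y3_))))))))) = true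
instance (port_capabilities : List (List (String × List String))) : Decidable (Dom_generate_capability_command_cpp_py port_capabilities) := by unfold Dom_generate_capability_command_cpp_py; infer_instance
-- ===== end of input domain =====

-- B replaces A's hash-set-then-sort by an online insertion into a sorted duplicate-free accumulator (no sort, no set): alternative algorithm, same result.

-- ===== PORT A =====
-- _escape_cpp_string (shared verbatim by Source A and Source B)
def pvEscapeCpp (value : String) : String :=
  PySem.Str.replace (PySem.Str.replace value "\\" "\\\\") "\"" "\\\""

-- port_cap['commands'] (first-match dict lookup; Pre_ guarantees the key is present)
def pvCmds (port_cap : List (String × List String)) : List String :=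
  PySem.Dict.getD (PySem.Dict.mk port_cap) "commands" []

-- f'          commands.add("{escaped_command}");'
def pvLine (command : String) : String :=
  "          commands.add(\"" ++ pvEscapeCpp command ++ "\");"

def generate_capability_command_cpp_py (port_capabilities : List (List (String × List String))) : String :=
  if port_capabilities = [] then "          // No commands configured"
  else
    let all_commands : PySem.Set String :=
      port_capabilities.foldl (fun s port_cap => PySem.Set.update s (pvCmds port_cap)) PySem.Set.empty
    let sorted_commands := PySem.List.sorted all_commands (fun x => x) false
    let lines := sorted_commands.foldl (fun ls command => ls ++ [pvLine command]) []
    PySem.Str.join "\n" lines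

-- ===== PORT B =====
-- Source B's inner while/insert loop: walk past elements < command, then insert
-- unless the command is already there (structural recursion on the accumulator).
def pvIns (command : String) : List String → List String
  | [] => [command]
  | x :: t =>
      if x < command then x :: pvIns command t
      else if x ≠ command then command :: x :: t
      else x :: t

def generate_capability_command_cpp_py_alt (port_capabilities : List (List (String × List String))) : String :=
  if port_capabilities = [] then "          // No commands configured"
  else
    let acc := port_capabilities.foldl
      (fun acc port_cap => (pvCmds port_cap).foldl (fun a command => pvIns command a) acc) []
    PySem.Str.join "\n" (acc.map pvLine)

-- ===== PRECONDITION & SPEC =====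
-- Pre_ excludes exactly the inputs where some port_cap lacks the key 'commands', on which both A and B raise KeyError.
def Pre_generate_capability_command_cpp_py (port_capabilities : List (List (String × List String))) : Prop :=
  ∀ pc ∈ port_capabilities, ∃ kv ∈ pc, kv.1 = "commands"
instance (port_capabilities : List (List (String × List String))) : Decidable (Pre_generate_capability_command_cpp_py port_capabilities) := by unfold Pre_generate_capability_command_cpp_py; infer_instance

def pvWitness_generate_capability_command_cpp_py : (List (List (String × List String))) :=
  [[("commands", ["volume_up", "power"])], [("commands", ["power"])]]

def Spec_generate_capability_command_cpp_py (port_capabilities : List (List (String × List String))) (out : String) : Prop := out = generate_capability_command_cpp_py_alt port_capabilities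
instance (port_capabilities : List (List (String × List String))) (out : String) : Decidable (Spec_generate_capability_command_cpp_py port_capabilities out) := by unfold Spec_generate_capability_command_cpp_py; infer_instance

-- ===== CLAIM =====
def Claim_equal_generate_capability_command_cpp_py : Prop := ∀ (port_capabilities : List (List (String × List String))), Dom_generate_capability_command_cpp_py port_capabilities → Pre_generate_capability_command_cpp_py port_capabilities → Spec_generate_capability_command_cpp_py port_capabilities (generate_capability_command_cpp_py port_capabilities)

-- ===== LEMMAS AND PROOFS =====

theorem mem_pvIns (c y : String) (l : List String) : y ∈ pvIns c l ↔ y ∈ l ∨ y = c := by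
  induction l with
  | nil => simp [pvIns]
  | cons x t ih =>
    simp only [pvIns]
    split_ifs with h1 h2
    · simp [ih]; tauto
    · simp; tauto
    · have : x = c := by exact not_ne_iff.mp h2
      subst this; simp; tauto

theorem pairwise_pvIns (c : String) (l : List String) (h : l.Pairwise (fun a b => a < b)) :
    (pvIns c l).Pairwise (fun a b => a < b) := by
  induction l with
  | nil => simp [pvIns]
  | cons x t ih =>
    rw [List.pairwise_cons] at h
    obtain ⟨hx, ht⟩ := h
    simp only [pvIns]
    split_ifs with h1 h2
    · rw [List.pairwise_cons]
      refine ⟨fun y hy => ?_, ih ht⟩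
      rcases (mem_pvIns c y t).mp hy with hyt | rfl
      · exact hx y hyt
      · exact h1
    · have hcx : c < x := lt_of_le_of_ne (not_lt.mp h1) (fun e => h2 e.symm)
      rw [List.pairwise_cons]
      refine ⟨fun y hy => ?_, List.Pairwise.cons hx ht⟩
      rcases List.mem_cons.mp hy with rfl | hyt
      · exact hcx
      · exact lt_trans hcx (hx y hyt)
    · exact List.Pairwise.cons hx ht

theorem fold_pvIns_spec (cs : List String) : ∀ (acc : List String),
    acc.Pairwise (fun a b => a < b) →
    (cs.foldl (fun a command => pvIns command a) acc).Pairwise (fun a b => a < b) ∧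
    (∀ y, y ∈ cs.foldl (fun a command => pvIns command a) acc ↔ y ∈ acc ∨ y ∈ cs) := by
  induction cs with
  | nil => intro acc h; exact ⟨by simpa using h, fun y => by simp⟩
  | cons c t ih =>
    intro acc h
    simp only [List.foldl_cons]
    have hIH := ih (pvIns c acc) (pairwise_pvIns c acc h)
    refine ⟨hIH.1, fun y => ?_⟩
    rw [hIH.2 y, mem_pvIns]
    simp; tauto

-- A's set-building loop collects exactly the set of the flattened command list
theorem pvCollect_eq_ofList (pcs : List (List (String × List String))) :
    ∀ (s : PySem.Set String),
      pcs.foldl (fun s port_cap => PySem.Set.update s (pvCmds port_cap)) s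
        = (pcs.flatMap pvCmds).foldl PySem.Set.add s := by
  induction pcs with
  | nil => intro s; simp
  | cons pc pcs ih =>
    intro s
    simp only [List.foldl_cons, List.flatMap_cons, List.foldl_append]
    rw [ih]
    rfl

-- B's nested loops insert exactly the flattened command list, in order
theorem pvNested_eq_flat (pcs : List (List (String × List String))) :
    ∀ (acc : List String),
      pcs.foldl (fun acc port_cap => (pvCmds port_cap).foldl (fun a command => pvIns command a) acc) acc
        = (pcs.flatMap pvCmds).foldl (fun a command => pvIns command a) acc := by
  induction pcs with
  | nil => intro acc; simp
  | cons pc pcs ih =>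
    intro acc
    simp only [List.foldl_cons, List.flatMap_cons, List.foldl_append]
    rw [ih]

theorem generate_capability_command_cpp_py_main (pcs : List (List (String × List String))) :
    generate_capability_command_cpp_py pcs = generate_capability_command_cpp_py_alt pcs := by
  unfold generate_capability_command_cpp_py generate_capability_command_cpp_py_alt
  by_cases hnil : pcs = []
  · simp [hnil]
  · simp only [if_neg hnil]
    rw [PySem.List.foldl_append_singleton_eq_map, pvNested_eq_flat]
    simp only [List.nil_append]
    set flat := pcs.flatMap pvCmds with hflat
    have hset : pcs.foldl (fun s port_cap => PySem.Set.update s (pvCmds port_cap)) PySem.Set.empty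
        = PySem.Set.ofList flat := by
      rw [pvCollect_eq_ofList, PySem.Set.ofList_eq_foldl]; rfl
    rw [hset]
    have hspec := fold_pvIns_spec flat [] (by simp)
    have hperm : (flat.foldl (fun a command => pvIns command a) []).Perm (PySem.Set.ofList flat) := by
      rw [List.perm_ext_iff_of_nodup (hspec.1.imp ne_of_lt) (PySem.Set.nodup_ofList _)]
      intro a
      rw [hspec.2 a, PySem.Set.mem_ofList]
      simp
    have hkey : PySem.List.sorted (PySem.Set.ofList flat) (fun x => x) false
        = flat.foldl (fun a command => pvIns command a) [] :=
      PySem.List.sorted_eq_of_perm_of_pairwise_lt (PySem.Set.ofList flat) _ (fun x => x) hperm hspec.1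
    rw [hkey]

-- ===== VERDICT =====
theorem generate_capability_command_cpp_py_spec : Claim_equal_generate_capability_command_cpp_py := by
  intro pcs _ _
  unfold Spec_generate_capability_command_cpp_py
  exact generate_capability_command_cpp_py_main pcs
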